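-- pv_equiv track=rewrite | github.com/pwhjy/Port_SLAP_Simulator | algorithm/baseline/merged_SA.py | cal_slot_diff
-- ===== SOURCE A (Python) =====
-- def cal_slot_diff(container, slot):
--     """
--     计算翻箱率   sum_ 集装箱i放在列s将导致的翻箱数
--     """
--     slot_size = len(slot[4])
--     if slot_size < 1:
--         return 0
--     diff = 0
--     for i in range(slot_size):
--         if slot[4][i] == -1:
--             return diff
--
--         if slot[4][i] > container['weight']:
--             diff += 1
--     return diff
-- ===== SOURCE B (Python) =====
-- def cal_slot_diff(container, slot):
--     stack = slot[4]
--     try: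
--         boundary = stack.index(-1)
--     except ValueError:
--         boundary = len(stack)
--     prefix = stack[:boundary]
--     if not prefix:
--         return 0
--     w = container['weight']
--     return sum(1 for x in prefix if x > w)
-- ===== Notes on version B (the rewrite author's own statement) =====
-- stated objective: alternative
-- what changed: Replaced the single early-exit counting loop by a two-phase decomposition: first locate the -1 sentinel boundary with list.index, then count elements greater than the weight over the prefix slice.
import Mathlib
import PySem

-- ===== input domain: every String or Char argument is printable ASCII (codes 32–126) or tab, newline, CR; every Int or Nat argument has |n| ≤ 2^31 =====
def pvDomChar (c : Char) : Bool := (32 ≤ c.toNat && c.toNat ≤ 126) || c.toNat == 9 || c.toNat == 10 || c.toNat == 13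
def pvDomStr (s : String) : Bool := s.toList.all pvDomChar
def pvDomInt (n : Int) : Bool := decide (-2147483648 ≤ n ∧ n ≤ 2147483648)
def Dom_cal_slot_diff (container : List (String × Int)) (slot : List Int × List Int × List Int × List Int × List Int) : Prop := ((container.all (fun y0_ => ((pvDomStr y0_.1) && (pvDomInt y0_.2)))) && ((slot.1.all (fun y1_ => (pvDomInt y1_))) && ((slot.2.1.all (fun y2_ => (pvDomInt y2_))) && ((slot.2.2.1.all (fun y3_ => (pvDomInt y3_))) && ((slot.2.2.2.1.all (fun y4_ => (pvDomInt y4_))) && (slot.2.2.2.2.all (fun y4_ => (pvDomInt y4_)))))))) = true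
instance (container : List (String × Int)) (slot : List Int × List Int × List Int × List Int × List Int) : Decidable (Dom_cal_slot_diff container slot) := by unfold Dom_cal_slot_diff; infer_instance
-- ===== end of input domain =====

-- B replaces A's single early-exit counting loop by a two-phase decomposition:
-- find the -1 sentinel boundary first, then count heavier elements over the prefix slice.

-- ===== PORT A =====
-- A's for-loop with early return on -1; the weight lookup happens inside the loop body.
def calSlotLoopA (container : List (String × Int)) : List Int → Int → Int
  | [], diff => diff
  | x :: xs, diff =>
      if x = -1 then diff
      else if x > (PySem.Dict.mk container).getD "weight" 0 then calSlotLoopA container xs (diff + 1)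
      else calSlotLoopA container xs diff

def cal_slot_diff (container : List (String × Int)) (slot : List Int × List Int × List Int × List Int × List Int) : Int :=
  let stack := slot.2.2.2.2
  if stack.length < 1 then 0
  else calSlotLoopA container stack 0

-- ===== PORT B =====
def cal_slot_diff_alt (container : List (String × Int)) (slot : List Int × List Int × List Int × List Int × List Int) : Int :=
  let stack := slot.2.2.2.2
  let boundary : Nat :=
    match PySem.List.index? stack (-1 : Int) with
    | some i => i
    | none => stack.length
  let pref := stack.take boundary
  if pref = [] then 0
  else
    let w := (PySem.Dict.mk container).getD "weight" 0
    ((pref.filter (fun x => x > w)).length : Int)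

-- ===== PRECONDITION & SPEC =====
-- Pre_ excludes exactly the inputs on which Python A raises KeyError ('weight' missing while the
-- loop reaches a non-sentinel element); Python B raises there too.
def Pre_cal_slot_diff (container : List (String × Int)) (slot : List Int × List Int × List Int × List Int × List Int) : Prop :=
  slot.2.2.2.2 ≠ [] → slot.2.2.2.2.head? ≠ some (-1) → ((PySem.Dict.mk container).get? "weight").isSome
instance (container : List (String × Int)) (slot : List Int × List Int × List Int × List Int × List Int) : Decidable (Pre_cal_slot_diff container slot) := by unfold Pre_cal_slot_diff; infer_instance

def pvWitness_cal_slot_diff : (List (String × Int)) × (List Int × List Int × List Int × List Int × List Int) :=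
  ([("weight", 5)], ([], [], [], [], [7, 3, -1, 9]))

def Spec_cal_slot_diff (container : List (String × Int)) (slot : List Int × List Int × List Int × List Int × List Int) (out : Int) : Prop := out = cal_slot_diff_alt container slot
instance (container : List (String × Int)) (slot : List Int × List Int × List Int × List Int × List Int) (out : Int) : Decidable (Spec_cal_slot_diff container slot out) := by unfold Spec_cal_slot_diff; infer_instance

-- ===== CLAIM (what is proved, stated in full; the proofs are below) =====
def Claim_equal_cal_slot_diff : Prop := ∀ (container : List (String × Int)) (slot : List Int × List Int × List Int × List Int × List Int), Dom_cal_slot_diff container slot → Pre_cal_slot_diff container slot → Spec_cal_slot_diff container slot (cal_slot_diff container slot)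

-- ===== LEMMAS AND PROOFS =====

-- B's boundary prefix is the leading segment without the sentinel.
theorem take_boundary_eq_takeWhile (stack : List Int) :
    stack.take (match PySem.List.index? stack (-1 : Int) with
                | some i => i | none => stack.length)
      = stack.takeWhile (fun x => decide (x ≠ -1)) := by
  induction stack with
  | nil => rfl
  | cons x xs ih =>
    by_cases hx : x = -1
    · subst hx
      rw [PySem.List.index?_cons_self]
      simp [List.takeWhile]
    · rw [PySem.List.index?_cons_of_ne xs hx]
      cases h : PySem.List.index? xs (-1 : Int) with
      | none =>
        simp only [Option.map_none, List.takeWhile_cons, decide_eq_true_eq]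
        rw [if_pos hx]
        simp only [List.length_cons, List.take_succ_cons]
        rw [← ih]; rw [h]
      | some i =>
        simp only [Option.map_some, List.takeWhile_cons, decide_eq_true_eq]
        rw [if_pos hx]
        simp only [List.take_succ_cons]
        rw [← ih]; rw [h]

-- A's loop accumulates the count of heavy elements over the pre-sentinel segment.
theorem calSlotLoopA_eq (container : List (String × Int)) (stack : List Int) (d : Int) :
    calSlotLoopA container stack d
      = d + (((stack.takeWhile (fun x => decide (x ≠ -1))).filter
               (fun x => x > (PySem.Dict.mk container).getD "weight" 0)).length : Int) := by
  induction stack generalizing d with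
  | nil => simp [calSlotLoopA]
  | cons x xs ih =>
    by_cases hx : x = -1
    · subst hx
      simp [calSlotLoopA, List.takeWhile]
    · simp only [calSlotLoopA, if_neg hx, List.takeWhile_cons, decide_eq_true_eq, if_pos hx]
      by_cases hw : x > (PySem.Dict.mk container).getD "weight" 0
      · rw [if_pos hw, ih]
        simp only [List.filter_cons, decide_eq_true hw, if_true, List.length_cons]
        push_cast
        ring
      · rw [if_neg hw, ih]
        simp [hw]

-- ===== VERDICT (by name: the statement is the Claim_ definition above) =====
theorem cal_slot_diff_spec : Claim_equal_cal_slot_diff := by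
  intro container slot _ _
  unfold Spec_cal_slot_diff cal_slot_diff cal_slot_diff_alt
  simp only
  rw [take_boundary_eq_takeWhile]
  by_cases hs : slot.2.2.2.2.takeWhile (fun x => decide (x ≠ -1)) = []
  · rw [if_pos hs]
    cases h : slot.2.2.2.2 with
    | nil => simp
    | cons x xs =>
      rw [h] at hs
      simp only [List.takeWhile_cons] at hs
      by_cases hx : x = -1
      · simp [calSlotLoopA, hx]
      · simp [hx] at hs
  · rw [if_neg hs]
    have hne : slot.2.2.2.2 ≠ [] := by
      intro h; rw [h] at hs; exact hs rfl
    rw [if_neg (by simp [hne])]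
    rw [calSlotLoopA_eq]
    ring
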